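-- pv_equiv track=rewrite | github.com/Hsiangpo/OldironCrawler | src/oldironcrawler/runtime/store.py | _max_retry_count_for_error
-- ===== SOURCE A (Python) =====
-- def _max_retry_count_for_error(error_text: str) -> int:
--     lowered = str(error_text or "").lower()
--     if any(
--         token in lowered
--         for token in (
--             "tls connect error",
--             "tlsv1_alert",
--             "sslv3_alert_handshake_failure",
--             "openssl_internal",
--             "getaddrinfo() thread failed to start",
--             "thread failed to start",
--             "request_slot_timeout",
--             "llm_queue_timeout",
--             "resource temporarily unavailable",
--             "[errno 35]",
--             "page_batch_timeout",
--             "empty_page_batch",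
--             "site_deadline_exceeded",
--             "temporary_request:",
--         )
--     ):
--         return 2
--     return 1
-- ===== SOURCE B (Python) =====
-- _TOKENS = (
--     "tls connect error",
--     "tlsv1_alert",
--     "sslv3_alert_handshake_failure",
--     "openssl_internal",
--     "getaddrinfo() thread failed to start",
--     "thread failed to start",
--     "request_slot_timeout",
--     "llm_queue_timeout",
--     "resource temporarily unavailable",
--     "[errno 35]",
--     "page_batch_timeout",
--     "empty_page_batch",
--     "site_deadline_exceeded",
--     "temporary_request:",
-- )
--
-- # index the tokens once by their first character
-- _BY_FIRST = {}
-- for _t in _TOKENS: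
--     _BY_FIRST.setdefault(_t[0], []).append(_t)
--
--
-- def _max_retry_count_for_error(error_text: str) -> int:
--     lowered = str(error_text or "").lower()
--     for i, ch in enumerate(lowered):
--         for t in _BY_FIRST.get(ch, ()):
--             if lowered.startswith(t, i):
--                 return 2
--     return 1
-- ===== Notes on version B (the rewrite author's own statement) =====
-- stated objective: alternative
-- what changed: Replaces 14 independent substring searches over the lowered text with one left-to-right scan that, at each position, consults a dict built once from the tokens' first characters and checks only those tokens as prefixes.
import Mathlib
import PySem

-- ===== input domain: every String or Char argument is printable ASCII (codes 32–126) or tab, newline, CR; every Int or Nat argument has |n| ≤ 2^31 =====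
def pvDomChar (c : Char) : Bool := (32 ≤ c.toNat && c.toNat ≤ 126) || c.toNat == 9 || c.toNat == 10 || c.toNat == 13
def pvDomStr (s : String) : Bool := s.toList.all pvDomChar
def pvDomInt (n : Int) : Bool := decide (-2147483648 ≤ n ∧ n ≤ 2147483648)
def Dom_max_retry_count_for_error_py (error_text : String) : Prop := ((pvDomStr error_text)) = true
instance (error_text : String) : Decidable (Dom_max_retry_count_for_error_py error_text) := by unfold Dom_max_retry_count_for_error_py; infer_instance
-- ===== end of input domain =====

-- B replaces A's 14 independent substring searches by one left-to-right scan with a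
-- first-character dict index built once from the tokens (objective: alternative).
-- Note: `str(error_text or "")` is the identity on str inputs (a falsy str IS ""), so both
-- ports lower the input directly.

-- ===== PORT A =====
def pvTokensA : List String :=
  ["tls connect error", "tlsv1_alert", "sslv3_alert_handshake_failure", "openssl_internal",
   "getaddrinfo() thread failed to start", "thread failed to start", "request_slot_timeout",
   "llm_queue_timeout", "resource temporarily unavailable", "[errno 35]", "page_batch_timeout",
   "empty_page_batch", "site_deadline_exceeded", "temporary_request:"]

def max_retry_count_for_error_py (error_text : String) : Int :=
  let lowered := PySem.Str.lower error_text
  if pvTokensA.any (fun token => PySem.Str.isIn token lowered) then 2 else 1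

-- ===== PORT B =====
def pvTokensB : List String :=
  ["tls connect error", "tlsv1_alert", "sslv3_alert_handshake_failure", "openssl_internal",
   "getaddrinfo() thread failed to start", "thread failed to start", "request_slot_timeout",
   "llm_queue_timeout", "resource temporarily unavailable", "[errno 35]", "page_batch_timeout",
   "empty_page_batch", "site_deadline_exceeded", "temporary_request:"]

-- module-level: _BY_FIRST.setdefault(t[0], []).append(t)  (tokens are nonempty, t[0] = head)
def pvByFirst : PySem.Dict Char (List String) :=
  pvTokensB.foldl
    (fun d t => d.insert (t.toList.headD ' ') (d.getD (t.toList.headD ' ') [] ++ [t]))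
    PySem.Dict.empty

-- for i, ch in enumerate(lowered): for t in _BY_FIRST.get(ch, ()): if lowered.startswith(t, i): return 2
-- lowered.startswith(t, i) is exactly: t is a prefix of the current suffix ch :: rest
def pvScanB : List Char → Bool
  | [] => false
  | ch :: rest =>
      (pvByFirst.getD ch []).any (fun t => PySem.Chars.startswith (ch :: rest) t.toList)
      || pvScanB rest

def max_retry_count_for_error_py_alt (error_text : String) : Int :=
  if pvScanB (PySem.Str.lower error_text).toList then 2 else 1

-- ===== PRECONDITION & SPEC =====
def Spec_max_retry_count_for_error_py (error_text : String) (out : Int) : Prop := out = max_retry_count_for_error_py_alt error_text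
instance (error_text : String) (out : Int) : Decidable (Spec_max_retry_count_for_error_py error_text out) := by unfold Spec_max_retry_count_for_error_py; infer_instance

-- ===== CLAIM (what is proved, stated in full; the proofs are below) =====
def Claim_equal_max_retry_count_for_error_py : Prop := ∀ (error_text : String), Dom_max_retry_count_for_error_py error_text → Spec_max_retry_count_for_error_py error_text (max_retry_count_for_error_py error_text)

-- ===== LEMMAS AND PROOFS =====

-- the first-char index built by B's module loop: looking up ch yields exactly the tokens whose head is ch
theorem getD_buildByFirst (l : List String) (d : PySem.Dict Char (List String)) (ch : Char) :
    (l.foldl (fun d t => d.insert (t.toList.headD ' ') (d.getD (t.toList.headD ' ') [] ++ [t])) d).getD ch []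
      = d.getD ch [] ++ l.filter (fun t => t.toList.headD ' ' == ch) := by
  induction l generalizing d with
  | nil => simp
  | cons t l ih =>
      simp only [List.foldl_cons, List.filter_cons, ih, PySem.Dict.getD_insert]
      by_cases h : t.toList.head?.getD ' ' = ch
      · simp [h]
      · simp [h, Ne.symm h]

theorem mem_pvByFirst (ch : Char) (t : String) :
    t ∈ pvByFirst.getD ch [] ↔ t ∈ pvTokensB ∧ t.toList.headD ' ' = ch := by
  rw [pvByFirst, getD_buildByFirst]
  simp [List.mem_filter]

theorem tokensB_ne_nil : ∀ t ∈ pvTokensB, t.toList ≠ [] := by decide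

theorem pvScanB_iff (s : List Char) :
    pvScanB s = true ↔ ∃ t ∈ pvTokensB, t.toList <:+: s := by
  induction s with
  | nil =>
      simp only [pvScanB]
      constructor
      · intro h; exact absurd h (by decide)
      · rintro ⟨t, ht, hinf⟩
        exact absurd (List.eq_nil_of_infix_nil hinf) (tokensB_ne_nil t ht)
  | cons ch rest ih =>
      simp only [pvScanB, Bool.or_eq_true, List.any_eq_true, ih]
      constructor
      · rintro (⟨t, htmem, hsw⟩ | ⟨t, ht, hinf⟩)
        · obtain ⟨ht, _⟩ := (mem_pvByFirst ch t).mp htmem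
          exact ⟨t, ht, ((PySem.Chars.startswith_iff _ _).mp hsw).isInfix⟩
        · exact ⟨t, ht, hinf.trans (List.infix_cons (List.infix_refl rest))⟩
      · rintro ⟨t, ht, hinf⟩
        rcases List.infix_cons_iff.mp hinf with hpre | hinf'
        · left
          refine ⟨t, (mem_pvByFirst ch t).mpr ⟨ht, ?_⟩, (PySem.Chars.startswith_iff _ _).mpr hpre⟩
          obtain ⟨u, hu⟩ := hpre
          cases hhead : t.toList with
          | nil => exact absurd hhead (tokensB_ne_nil t ht)
          | cons c cs =>
              rw [hhead] at hu
              simp only [List.cons_append, List.cons.injEq] at hu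
              simp [hu.1]
        · exact Or.inr ⟨t, ht, hinf'⟩

-- ===== VERDICT (by name: the statement is the Claim_ definition above) =====
theorem max_retry_count_for_error_py_spec : Claim_equal_max_retry_count_for_error_py := by
  intro error_text _
  unfold Spec_max_retry_count_for_error_py max_retry_count_for_error_py max_retry_count_for_error_py_alt
  have h : pvTokensA.any (fun token => PySem.Str.isIn token (PySem.Str.lower error_text))
      = pvScanB (PySem.Str.lower error_text).toList := by
    rw [Bool.eq_iff_iff, List.any_eq_true, pvScanB_iff]
    constructor
    · rintro ⟨t, ht, hin⟩
      exact ⟨t, ht, (PySem.Str.isIn_iff_infix _ _).mp hin⟩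
    · rintro ⟨t, ht, hinf⟩
      exact ⟨t, ht, (PySem.Str.isIn_iff_infix _ _).mpr hinf⟩
  simp only [h]
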